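-- pv_equiv track=rewrite | github.com/vk7496/Oman-vista-backend | main.py | fallback_images
-- ===== SOURCE A (Python) =====
-- WIKIMEDIA_FALLBACKS = [
--     # مسیرهای امنی که قبلاً تست کرده‌ایم
--     "https://upload.wikimedia.org/wikipedia/commons/5/5d/Muscat_Oman_sunset.jpg",
--     "https://upload.wikimedia.org/wikipedia/commons/f/f4/Muscat_City.jpg",
--     "https://upload.wikimedia.org/wikipedia/commons/6/6d/Salalah_beach.jpg",
-- ]
--
-- def fallback_images(per: int = 6) -> list[str]:
--     if not WIKIMEDIA_FALLBACKS:
--         return [f"https://placehold.co/1200x800?text=OmanVista"] * per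
--     out = []
--     i = 0
--     while len(out) < per:
--         out.append(WIKIMEDIA_FALLBACKS[i % len(WIKIMEDIA_FALLBACKS)])
--         i += 1
--     return out
-- ===== SOURCE B (Python) =====
-- WIKIMEDIA_FALLBACKS = [
--     "https://upload.wikimedia.org/wikipedia/commons/5/5d/Muscat_Oman_sunset.jpg",
--     "https://upload.wikimedia.org/wikipedia/commons/f/f4/Muscat_City.jpg",
--     "https://upload.wikimedia.org/wikipedia/commons/6/6d/Salalah_beach.jpg",
-- ]
--
-- def fallback_images(per: int = 6) -> list[str]:
--     if not WIKIMEDIA_FALLBACKS: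
--         return ["https://placehold.co/1200x800?text=OmanVista"] * per
--     reps = per // len(WIKIMEDIA_FALLBACKS) + 1
--     return (WIKIMEDIA_FALLBACKS * reps)[:per]
-- ===== Notes on version B (the rewrite author's own statement) =====
-- stated objective: simpler
-- what changed: Replaces the per-element while loop with modulo indexing by repeating the whole fallback list the needed number of times and slicing to length per.
import Mathlib
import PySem

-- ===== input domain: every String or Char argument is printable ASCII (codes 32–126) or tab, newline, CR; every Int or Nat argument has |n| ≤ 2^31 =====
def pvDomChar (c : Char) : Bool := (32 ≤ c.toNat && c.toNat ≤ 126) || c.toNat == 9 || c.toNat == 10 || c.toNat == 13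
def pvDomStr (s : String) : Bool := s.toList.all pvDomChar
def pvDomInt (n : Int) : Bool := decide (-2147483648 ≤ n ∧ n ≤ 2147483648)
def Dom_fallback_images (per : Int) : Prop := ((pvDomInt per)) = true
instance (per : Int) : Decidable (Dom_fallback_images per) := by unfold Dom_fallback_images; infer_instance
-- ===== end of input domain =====

-- B replaces the per-element while loop (modulo indexing) by repeat-whole-list-then-slice; objective: simpler.

def pvFallbacks : List String :=
  [ "https://upload.wikimedia.org/wikipedia/commons/5/5d/Muscat_Oman_sunset.jpg",
    "https://upload.wikimedia.org/wikipedia/commons/f/f4/Muscat_City.jpg",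
    "https://upload.wikimedia.org/wikipedia/commons/6/6d/Salalah_beach.jpg" ]

def pvPlacehold : String := "https://placehold.co/1200x800?text=OmanVista"

-- ===== PORT A =====
-- the while loop: append WIKIMEDIA_FALLBACKS[i % len] until len(out) == per
def fallback_images_loop (per : Int) (out : List String) (i : Int) : List String :=
  if h : (out.length : Int) < per then
    fallback_images_loop per
      (out ++ [PySem.List.pyGetD pvFallbacks (PySem.Int.mod i (PySem.List.len pvFallbacks)) ""]) (i + 1)
  else out
termination_by (per - out.length).toNat
decreasing_by simp only [List.length_append, List.length_cons, List.length_nil]; omega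

def fallback_images (per : Int) : List String :=
  if pvFallbacks.isEmpty then List.replicate per.toNat pvPlacehold
  else fallback_images_loop per [] 0

-- ===== PORT B =====
def fallback_images_alt (per : Int) : List String :=
  if pvFallbacks.isEmpty then List.replicate per.toNat pvPlacehold
  else
    let reps := PySem.Int.floordiv per (PySem.List.len pvFallbacks) + 1
    PySem.List.slice (List.flatten (List.replicate reps.toNat pvFallbacks)) none (some per)

-- ===== PRECONDITION & SPEC =====
def Spec_fallback_images (per : Int) (out : List String) : Prop := out = fallback_images_alt per
instance (per : Int) (out : List String) : Decidable (Spec_fallback_images per out) := by unfold Spec_fallback_images; infer_instance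

-- ===== CLAIM (what is proved, stated in full; the proofs are below) =====
def Claim_equal_fallback_images : Prop := ∀ (per : Int), Dom_fallback_images per → Spec_fallback_images per (fallback_images per)

-- ===== LEMMAS AND PROOFS =====

-- the cyclic sequence A's loop produces: n elements starting at index j
def pvCyc : Nat → Nat → List String
  | 0, _ => []
  | n + 1, j => pvFallbacks.getD (j % 3) "" :: pvCyc n (j + 1)

theorem pvCyc_length (n j : Nat) : (pvCyc n j).length = n := by
  induction n generalizing j with
  | zero => rfl
  | succ n ih => simp [pvCyc, ih]

theorem pvCyc_split (a b j : Nat) : pvCyc (a + b) j = pvCyc a j ++ pvCyc b (j + a) := by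
  induction a generalizing j with
  | zero => simp [pvCyc]
  | succ a ih =>
      have : a + 1 + b = (a + b) + 1 := by omega
      rw [this]
      simp only [pvCyc, ih (j + 1)]
      have : j + 1 + a = j + (a + 1) := by omega
      rw [this]
      simp

theorem pvCyc_three (j : Nat) (h : j % 3 = 0) : pvCyc 3 j = pvFallbacks := by
  have h1 : (j + 1) % 3 = 1 := by omega
  have h2 : (j + 2) % 3 = 2 := by omega
  simp only [pvCyc, h]
  have : j + 1 + 1 = j + 2 := by omega
  rw [this, h1, h2]
  rfl

theorem pvFlatten_rep (k j : Nat) (h : j % 3 = 0) :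
    (List.replicate k pvFallbacks).flatten = pvCyc (3 * k) j := by
  induction k generalizing j with
  | zero => simp [pvCyc]
  | succ k ih =>
      have e : 3 * (k + 1) = 3 + 3 * k := by omega
      simp only [List.replicate_succ, List.flatten_cons]
      rw [e, pvCyc_split 3 (3 * k) j, pvCyc_three j h, ih (j + 3) (by omega)]

theorem pvTake_cyc (n m j : Nat) (h : n ≤ m) : (pvCyc m j).take n = pvCyc n j := by
  have e : m = n + (m - n) := by omega
  rw [e, pvCyc_split]
  rw [List.take_append_of_le_length (by simp [pvCyc_length])]
  exact List.take_of_length_le (by simp [pvCyc_length])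

theorem pvLoop_eq (n : Nat) (out : List String) (j : Nat) :
    fallback_images_loop ((out.length : Int) + (n : Int)) out (j : Int) = out ++ pvCyc n j := by
  induction n generalizing out j with
  | zero =>
      rw [fallback_images_loop]
      simp [pvCyc]
  | succ n ih =>
      rw [fallback_images_loop]
      have hc : (out.length : Int) < (out.length : Int) + ((n : Int) + 1) := by omega
      rw [dif_pos (by push_cast; omega)]
      have hmod : PySem.Int.mod (j : Int) (PySem.List.len pvFallbacks) = ((j % 3 : Nat) : Int) := by
        simp [pvFallbacks, PySem.List.len]
      have hget : PySem.List.pyGetD pvFallbacks (PySem.Int.mod (j : Int) (PySem.List.len pvFallbacks)) ""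
          = pvFallbacks.getD (j % 3) "" := by
        rw [hmod, PySem.List.pyGetD_natCast]
      rw [hget]
      have e1 : (out.length : Int) + ((n : Nat) + 1 : Nat) =
          (((out ++ [pvFallbacks.getD (j % 3) ""]).length : Nat) : Int) + (n : Int) := by
        simp; omega
      have e2 : (j : Int) + 1 = ((j + 1 : Nat) : Int) := by push_cast; ring
      rw [e1, e2, ih]
      simp [pvCyc]

theorem fallback_images_spec : Claim_equal_fallback_images := by
  intro per _
  unfold Spec_fallback_images fallback_images fallback_images_alt
  rw [if_neg (by decide), if_neg (by decide)]
  show fallback_images_loop per [] 0 =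
    PySem.List.slice
      ((List.replicate (PySem.Int.floordiv per (PySem.List.len pvFallbacks) + 1).toNat pvFallbacks).flatten)
      none (some per)
  set reps : Int := PySem.Int.floordiv per (PySem.List.len pvFallbacks) + 1 with hreps
  have hlen : PySem.List.len pvFallbacks = 3 := by rfl
  by_cases hp : 0 ≤ per
  · -- per ≥ 0
    have hA : fallback_images_loop per [] 0 = pvCyc per.toNat 0 := by
      have h0 := pvLoop_eq per.toNat [] 0
      have e0 : ((([] : List String).length : Int) + ((per.toNat : Nat) : Int)) = per := by
        simp; omega
      rw [e0] at h0
      simpa using h0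
    rw [hA]
    -- B side
    have hmul : PySem.Int.floordiv per 3 * 3 + PySem.Int.mod per 3 = per :=
      PySem.Int.floordiv_mul_add_mod per 3
    have hm0 : 0 ≤ PySem.Int.mod per 3 := PySem.Int.mod_nonneg per (by norm_num)
    have hm3 : PySem.Int.mod per 3 < 3 := PySem.Int.mod_lt per (by norm_num)
    have hfd : 0 ≤ PySem.Int.floordiv per 3 := by nlinarith [hmul, hm0, hm3, hp]
    have hle : per.toNat ≤ 3 * reps.toNat := by
      rw [hreps, hlen]
      omega
    have hcast : per = ((per.toNat : Nat) : Int) := by omega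
    rw [pvFlatten_rep reps.toNat 0 (by omega)]
    rw [hcast, PySem.List.slice_to_natCast]
    rw [pvTake_cyc per.toNat (3 * reps.toNat) 0 (by simpa using hle)]
    simp only [Int.toNat_natCast]
  · -- per < 0 : A's loop exits immediately; B's reps ≤ 0 so the repeated list is empty
    have hA : fallback_images_loop per [] 0 = [] := by
      rw [fallback_images_loop]; rw [dif_neg (by simp; omega)]
    rw [hA]
    have hmul : PySem.Int.floordiv per 3 * 3 + PySem.Int.mod per 3 = per :=
      PySem.Int.floordiv_mul_add_mod per 3
    have hm0 : 0 ≤ PySem.Int.mod per 3 := PySem.Int.mod_nonneg per (by norm_num)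
    have hfd : PySem.Int.floordiv per 3 < 0 := by nlinarith [hmul, hm0]
    have : reps.toNat = 0 := by rw [hreps, hlen]; omega
    rw [this]
    simp [PySem.List.slice]
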